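-- pv_equiv track=rewrite | github.com/akggkp/n8n_copy | flask_app.py | is_youtube_url
-- ===== SOURCE A (Python) =====
-- def is_youtube_url(url):
--     """Check if URL is a valid YouTube URL"""
--     youtube_patterns = [
--         'youtube.com/watch',
--         'youtu.be/',
--         'youtube.com/playlist',
--         'youtube.com/channel',
--     ]
--     return any(pattern in url for pattern in youtube_patterns)
-- ===== SOURCE B (Python) =====
-- import re
--
-- _YT_RE = re.compile(r'youtube\.com/watch|youtu\.be/|youtube\.com/playlist|youtube\.com/channel')
--
-- def is_youtube_url(url):
--     """Check if URL is a valid YouTube URL"""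
--     return _YT_RE.search(url) is not None
-- ===== Notes on version B (the rewrite author's own statement) =====
-- stated objective: idiomatic
-- what changed: Replaces the per-pattern substring membership loop with one precompiled regex (escaped literal alternation) searched in a single engine pass over the url.
import Mathlib
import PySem

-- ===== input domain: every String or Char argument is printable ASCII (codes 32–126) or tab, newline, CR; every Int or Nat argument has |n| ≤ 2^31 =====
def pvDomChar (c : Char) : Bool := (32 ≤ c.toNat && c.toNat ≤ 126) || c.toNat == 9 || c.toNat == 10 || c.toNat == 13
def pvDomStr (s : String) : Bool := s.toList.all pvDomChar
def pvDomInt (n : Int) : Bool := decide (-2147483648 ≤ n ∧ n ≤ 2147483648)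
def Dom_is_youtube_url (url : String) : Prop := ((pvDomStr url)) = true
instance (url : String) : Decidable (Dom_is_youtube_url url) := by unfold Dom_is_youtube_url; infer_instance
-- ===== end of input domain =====

-- B replaces A's per-pattern substring-membership loop by one regex (escaped literal
-- alternation) searched in a single left-to-right pass; objective: idiomatic.


-- ===== PORT A =====
-- any(pattern in url for pattern in youtube_patterns)
def is_youtube_url (url : String) : Bool :=
  ["youtube.com/watch", "youtu.be/", "youtube.com/playlist", "youtube.com/channel"].any
    (fun pattern => PySem.Str.isIn pattern url)

-- ===== PORT B =====
-- B's regex is an alternation of literals; re.search on such a pattern is exactly: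
-- try each start position 0..len(url) left to right, at each position try the
-- alternatives in order, succeed on the first literal prefix match. Ported exactly.
def pvAlts : List (List Char) :=
  ["youtube.com/watch".toList, "youtu.be/".toList,
   "youtube.com/playlist".toList, "youtube.com/channel".toList]

def pvTryAlts (s : List Char) : Bool := pvAlts.any (fun p => p.isPrefixOf s)

def pvScan : List Char → Bool
  | [] => pvTryAlts []
  | c :: rest => pvTryAlts (c :: rest) || pvScan rest

def is_youtube_url_alt (url : String) : Bool := pvScan url.toList

-- ===== PRECONDITION & SPEC =====
def Spec_is_youtube_url (url : String) (out : Bool) : Prop := out = is_youtube_url_alt url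
instance (url : String) (out : Bool) : Decidable (Spec_is_youtube_url url out) := by unfold Spec_is_youtube_url; infer_instance

-- ===== CLAIM (what is proved, stated in full; the proofs are below) =====
def Claim_equal_is_youtube_url : Prop := ∀ (url : String), Dom_is_youtube_url url → Spec_is_youtube_url url (is_youtube_url url)

-- ===== LEMMAS AND PROOFS =====

theorem pvScan_iff (s : List Char) : pvScan s = true ↔ ∃ p ∈ pvAlts, p <:+: s := by
  induction s with
  | nil =>
      simp [pvScan, pvTryAlts, List.any_eq_true, List.isPrefixOf_iff_prefix,
        List.infix_iff_prefix_suffix]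
  | cons c rest ih =>
      simp only [pvScan, Bool.or_eq_true, ih, pvTryAlts, List.any_eq_true,
        List.isPrefixOf_iff_prefix]
      constructor
      · rintro (⟨p, hp, h⟩ | ⟨p, hp, h⟩)
        · exact ⟨p, hp, h.isInfix⟩
        · exact ⟨p, hp, h.trans (List.suffix_cons c rest).isInfix⟩
      · rintro ⟨p, hp, h⟩
        rcases List.infix_cons_iff.mp h with h' | h'
        · exact Or.inl ⟨p, hp, h'⟩
        · exact Or.inr ⟨p, hp, h'⟩

theorem is_youtube_url_eq (url : String) : is_youtube_url url = pvScan url.toList := by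
  rw [Bool.eq_iff_iff, pvScan_iff]
  simp [is_youtube_url, PySem.Chars.isIn_iff_infix, pvAlts]

-- ===== VERDICT (by name: the statement is the Claim_ definition above) =====
theorem is_youtube_url_spec : Claim_equal_is_youtube_url := by
  intro url _
  unfold Spec_is_youtube_url is_youtube_url_alt
  exact is_youtube_url_eq url
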